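-- pv_equiv track=rewrite | github.com/Anshifnu/reading-platform | ai-service/app/rag.py | find_book_by_title
-- ===== SOURCE A (Python) =====
-- def find_book_by_title(books, title: str):
--     """Find a specific book by its title (fuzzy)."""
--     title_lower = title.lower()
--     # Try exact match first
--     for b in books:
--         if (b.get("title") or "").lower() == title_lower:
--             return b
--     # Then try partial match
--     for b in books:
--         if title_lower in (b.get("title") or "").lower():
--             return b
--     return None
-- ===== SOURCE B (Python) =====
-- def find_book_by_title(books, title: str):
--     """Find a specific book by its title (fuzzy), in a single pass."""
--     title_lower = title.lower()
--     first_partial = None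
--     for b in books:
--         t = (b.get("title") or "").lower()
--         if t == title_lower:
--             return b
--         if first_partial is None and title_lower in t:
--             first_partial = b
--     return first_partial
-- ===== Notes on version B (the rewrite author's own statement) =====
-- stated objective: alternative
-- what changed: Replaces A's two sequential scans (exact pass, then partial pass) by one loop that returns on the first exact match and remembers the first partial match in a single variable.
import Mathlib
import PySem

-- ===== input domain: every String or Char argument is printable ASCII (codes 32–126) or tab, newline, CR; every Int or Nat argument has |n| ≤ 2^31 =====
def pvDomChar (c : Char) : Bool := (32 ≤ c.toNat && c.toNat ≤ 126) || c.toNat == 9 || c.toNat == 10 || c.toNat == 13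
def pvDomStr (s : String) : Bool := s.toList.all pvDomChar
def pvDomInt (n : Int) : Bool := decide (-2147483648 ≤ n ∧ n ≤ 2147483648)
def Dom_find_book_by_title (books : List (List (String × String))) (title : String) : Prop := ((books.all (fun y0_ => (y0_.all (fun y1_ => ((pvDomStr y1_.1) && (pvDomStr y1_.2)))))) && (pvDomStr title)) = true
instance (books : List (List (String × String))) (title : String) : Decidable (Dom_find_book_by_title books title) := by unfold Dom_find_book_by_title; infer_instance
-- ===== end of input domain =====

-- B replaces A's two sequential scans by one pass that remembers the first partial match (objective: alternative decomposition).

-- ===== PORT A =====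
-- (b.get("title") or "").lower(): on strings 'x or ""' equals x.getD "" (only "" is falsy, and "" or "" = "")
def pvTitleLower (b : List (String × String)) : String :=
  PySem.Str.lower (((PySem.Dict.mk b).get? "title").getD "")

-- first loop of A: exact match
def pvExactLoop (books : List (List (String × String))) (tl : String) : Option (List (String × String)) :=
  match books with
  | [] => none
  | b :: rest => if pvTitleLower b == tl then some b else pvExactLoop rest tl

-- second loop of A: partial (substring) match
def pvPartialLoop (books : List (List (String × String))) (tl : String) : Option (List (String × String)) :=
  match books with
  | [] => none
  | b :: rest => if PySem.Str.isIn tl (pvTitleLower b) then some b else pvPartialLoop rest tl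

def find_book_by_title (books : List (List (String × String))) (title : String) : Option (List (String × String)) :=
  let title_lower := PySem.Str.lower title
  match pvExactLoop books title_lower with
  | some b => some b
  | none => pvPartialLoop books title_lower

-- ===== PORT B =====
-- B's single loop; first_partial is the extra state threaded through
def pvAltLoop (tl : String) (books : List (List (String × String))) (first_partial : Option (List (String × String))) : Option (List (String × String)) :=
  match books with
  | [] => first_partial
  | b :: rest =>
    let t := pvTitleLower b
    if t == tl then some b
    else if first_partial.isNone && PySem.Str.isIn tl t then pvAltLoop tl rest (some b)
    else pvAltLoop tl rest first_partial

def find_book_by_title_alt (books : List (List (String × String))) (title : String) : Option (List (String × String)) :=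
  pvAltLoop (PySem.Str.lower title) books none

-- ===== PRECONDITION & SPEC =====
def Spec_find_book_by_title (books : List (List (String × String))) (title : String) (out : Option (List (String × String))) : Prop := out = find_book_by_title_alt books title
instance (books : List (List (String × String))) (title : String) (out : Option (List (String × String))) : Decidable (Spec_find_book_by_title books title out) := by unfold Spec_find_book_by_title; infer_instance

-- ===== CLAIM (what is proved, stated in full; the proofs are below) =====
def Claim_equal_find_book_by_title : Prop := ∀ (books : List (List (String × String))) (title : String), Dom_find_book_by_title books title → Spec_find_book_by_title books title (find_book_by_title books title)

-- ===== LEMMAS AND PROOFS =====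

-- loop invariant: B's single pass equals exact-scan, else the remembered candidate, else partial-scan
theorem pvAltLoop_eq (tl : String) (books : List (List (String × String)))
    (fp : Option (List (String × String))) :
    pvAltLoop tl books fp = ((pvExactLoop books tl).or (fp.or (pvPartialLoop books tl))) := by
  induction books generalizing fp with
  | nil => cases fp <;> simp [pvAltLoop, pvExactLoop, pvPartialLoop]
  | cons b rest ih =>
    simp only [pvAltLoop, pvExactLoop, pvPartialLoop]
    by_cases hx : pvTitleLower b == tl
    · simp [hx]
    · simp only [hx, Bool.false_eq_true, if_false]
      cases fp with
      | some v => simp [ih]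
      | none =>
        simp only [Option.isNone_none, Bool.true_and, ih]
        split_ifs with hp <;> cases h : pvExactLoop rest tl <;> simp [h, Option.or]

-- ===== VERDICT (by name: the statement is the Claim_ definition above) =====
theorem find_book_by_title_spec : Claim_equal_find_book_by_title := by
  intro books title _
  unfold Spec_find_book_by_title find_book_by_title find_book_by_title_alt
  rw [pvAltLoop_eq]
  cases h : pvExactLoop books (PySem.Str.lower title) <;> simp [h, Option.or]
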